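-- pv_equiv track=rewrite | github.com/koku17/vtu_lab_archives | 4/AI/lab7.py | find_related_facts
-- ===== SOURCE A (Python) =====
-- def find_related_facts(starting_facts,all_facts):
-- 	related_facts=[]
-- 	keep_finding=True
-- 	while keep_finding==True:
-- 		keep_finding=False
-- 		for fact in starting_facts:
-- 			for f in all_facts:
-- 				if f[0]==fact:
-- 					new_related_fact=[fact,f[1]]
-- 					if new_related_fact not in related_facts:
-- 						related_facts+=[new_related_fact]
-- 						starting_facts+=[f[1]]
-- 						keep_finding=True
-- 	return related_facts
-- ===== SOURCE B (Python) =====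
-- def find_related_facts(starting_facts, all_facts):
--     # BFS over an adjacency dict; note: unlike A, does not mutate starting_facts
--     adj = {}
--     for f in all_facts:
--         adj.setdefault(f[0], []).append(f[1])
--     result = []
--     seen = set()
--     queue = list(starting_facts)
--     i = 0
--     while i < len(queue):
--         fact = queue[i]
--         for t in adj.get(fact, []):
--             if (fact, t) not in seen:
--                 seen.add((fact, t))
--                 result.append([fact, t])
--                 queue.append(t)
--         i += 1
--     return result
-- ===== Notes on version B (the rewrite author's own statement) =====
-- stated objective: faster
-- what changed: Replaces A's repeated while-passes that rescan every fact in the growing starting list against all of all_facts with an O(n)-membership list check, by a single BFS over the queue using an adjacency dict built once and a set for O(1) pair dedup.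
-- outside the precondition, e.g. on find_related_facts(['a'], [['x']]): A returns [], B raises IndexError
import Mathlib
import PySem

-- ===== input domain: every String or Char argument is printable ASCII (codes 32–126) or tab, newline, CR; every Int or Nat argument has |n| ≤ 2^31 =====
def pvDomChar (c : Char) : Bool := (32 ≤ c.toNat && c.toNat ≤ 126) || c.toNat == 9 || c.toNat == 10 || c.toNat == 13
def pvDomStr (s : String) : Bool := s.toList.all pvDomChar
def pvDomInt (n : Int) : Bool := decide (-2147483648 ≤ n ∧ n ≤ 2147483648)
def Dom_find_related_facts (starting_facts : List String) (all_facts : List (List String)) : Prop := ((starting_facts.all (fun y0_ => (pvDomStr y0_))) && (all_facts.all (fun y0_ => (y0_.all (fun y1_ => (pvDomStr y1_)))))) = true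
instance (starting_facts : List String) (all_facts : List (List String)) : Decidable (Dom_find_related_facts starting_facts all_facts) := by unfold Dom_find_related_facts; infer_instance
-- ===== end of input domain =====

-- B replaces A's repeated passes over a growing list with inner scans of all_facts by a single
-- BFS over an adjacency dict plus a seen-set (objective: faster). A mutates starting_facts in
-- place (appends discovered facts); B does not — the equivalence proved here is about the
-- RETURN value only.

-- ===== PORT A =====
-- f[0] / f[1]; total via default "", exact under Pre_ (every fact has length ≥ 2)
def pvHead (f : List String) : String := PySem.List.pyGetD f 0 ""
def pvSnd (f : List String) : String := PySem.List.pyGetD f 1 ""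

-- the inner 'for f in all_facts' body for one fixed fact (state: related, starting, keep_finding)
def scanA (fact : String) : List (List String) → List (List String) × List String × Bool →
    List (List String) × List String × Bool
  | [], st => st
  | f :: fs, (rel, qs, kf) =>
      if pvHead f == fact then
        if [fact, pvSnd f] ∈ rel then scanA fact fs (rel, qs, kf)
        else scanA fact fs (rel ++ [[fact, pvSnd f]], qs ++ [pvSnd f], true)
      else scanA fact fs (rel, qs, kf)

-- 'for fact in starting_facts' over the LIVE (growing) list, by index; fuel is a totality guard
def passA (all : List (List String)) : Nat → Nat → List (List String) × List String × Bool →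
    List (List String) × List String × Bool
  | 0, _, st => st
  | fuel + 1, i, (rel, qs, kf) =>
      if i < qs.length then passA all fuel (i + 1) (scanA (qs.getD i "") all (rel, qs, kf))
      else (rel, qs, kf)

-- 'while keep_finding' ; fuel is a totality guard (two passes always suffice)
def loopA (all : List (List String)) : Nat → List (List String) → List String → List (List String)
  | 0, rel, _ => rel
  | fuel + 1, rel, qs =>
      match passA all (qs.length + all.length + 1) 0 (rel, qs, false) with
      | (rel', qs', kf) => if kf then loopA all fuel rel' qs' else rel'

def find_related_facts (starting_facts : List String) (all_facts : List (List String)) :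
    List (List String) :=
  loopA all_facts (all_facts.length + 1) [] starting_facts

-- ===== PORT B =====
-- adj.setdefault(f[0], []).append(f[1])
def buildAdj : List (List String) → PySem.Dict String (List String) → PySem.Dict String (List String)
  | [], d => d
  | f :: fs, d => buildAdj fs (d.insert (pvHead f) (d.getD (pvHead f) [] ++ [pvSnd f]))

-- the 'for t in adj.get(fact, [])' body (state: result, seen, queue)
def scanB (fact : String) : List String →
    List (List String) × PySem.Set (String × String) × List String →
    List (List String) × PySem.Set (String × String) × List String
  | [], st => st
  | t :: ts, (res, seen, qs) =>
      if PySem.Set.contains seen (fact, t) then scanB fact ts (res, seen, qs)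
      else scanB fact ts (res ++ [[fact, t]], PySem.Set.add seen (fact, t), qs ++ [t])

-- 'while i < len(queue)' ; fuel is a totality guard
def bfsB (adj : PySem.Dict String (List String)) : Nat → Nat →
    List (List String) × PySem.Set (String × String) × List String → List (List String)
  | 0, _, (res, _, _) => res
  | fuel + 1, i, (res, seen, qs) =>
      if i < qs.length then
        bfsB adj fuel (i + 1) (scanB (qs.getD i "") (adj.getD (qs.getD i "") []) (res, seen, qs))
      else res

def find_related_facts_alt (starting_facts : List String) (all_facts : List (List String)) :
    List (List String) :=
  bfsB (buildAdj all_facts PySem.Dict.empty) (starting_facts.length + all_facts.length + 1) 0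
    ([], PySem.Set.empty, starting_facts)

-- ===== PRECONDITION & SPEC =====
-- Pre_ excludes inputs with a fact of length < 2: Python A raises IndexError on f[0]/f[1] whenever
-- such a fact is reached, and B raises IndexError while building the adjacency dict; it also
-- excludes some inputs A happens to return on (a short fact never matched) — see claim cites.
def Pre_find_related_facts (starting_facts : List String) (all_facts : List (List String)) : Prop :=
  ∀ f ∈ all_facts, 2 ≤ f.length
instance (starting_facts : List String) (all_facts : List (List String)) :
    Decidable (Pre_find_related_facts starting_facts all_facts) := by
  unfold Pre_find_related_facts; infer_instance
def pvWitness_find_related_facts : List String × List (List String) :=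
  (["a"], [["a", "b"], ["b", "c"]])
def Spec_find_related_facts (starting_facts : List String) (all_facts : List (List String)) (out : List (List String)) : Prop := out = find_related_facts_alt starting_facts all_facts
instance (starting_facts : List String) (all_facts : List (List String)) (out : List (List String)) : Decidable (Spec_find_related_facts starting_facts all_facts out) := by unfold Spec_find_related_facts; infer_instance

-- ===== CLAIM (what is proved, stated in full; the proofs are below) =====
def Claim_equal_find_related_facts : Prop := ∀ (starting_facts : List String) (all_facts : List (List String)), Dom_find_related_facts starting_facts all_facts → Pre_find_related_facts starting_facts all_facts → Spec_find_related_facts starting_facts all_facts (find_related_facts starting_facts all_facts)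

-- ===== LEMMAS AND PROOFS =====

-- tails of the facts matching `fact`, in all_facts order (what adj.get(fact, []) holds)
def tailsOf (all : List (List String)) (fact : String) : List String :=
  (all.filter (fun f => pvHead f == fact)).map pvSnd

-- the pairs realizable from all_facts (used only to bound the growth of related_facts)
def pairsOf (all : List (List String)) : List (List String) :=
  all.map (fun f => [pvHead f, pvSnd f])

-- seen contains exactly the pairs recorded in rel
def InvSeen (seen : PySem.Set (String × String)) (rel : List (List String)) : Prop :=
  ∀ a b : String, PySem.Set.contains seen (a, b) = true ↔ [a, b] ∈ rel

lemma buildAdj_getD (all : List (List String)) (d : PySem.Dict String (List String))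
    (fact : String) :
    (buildAdj all d).getD fact [] = d.getD fact [] ++ tailsOf all fact := by
  induction all generalizing d with
  | nil => simp [buildAdj, tailsOf]
  | cons f fs ih =>
    rw [buildAdj, ih]
    by_cases h : pvHead f = fact
    · subst h
      simp [tailsOf, PySem.Dict.getD_insert_self]
    · have h2 : fact ≠ pvHead f := fun he => h he.symm
      simp [tailsOf, PySem.Dict.getD_insert, h2, beq_iff_eq, h]

lemma scan_eq (fact : String) (fs : List (List String)) :
    ∀ (rel : List (List String)) (qs : List String) (kf : Bool)
      (seen : PySem.Set (String × String)), InvSeen seen rel →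
    ∃ Δr Δq seen' kf',
      scanA fact fs (rel, qs, kf) = (rel ++ Δr, qs ++ Δq, kf') ∧
      scanB fact (tailsOf fs fact) (rel, seen, qs) = (rel ++ Δr, seen', qs ++ Δq) ∧
      InvSeen seen' (rel ++ Δr) ∧
      Δr.length = Δq.length ∧
      (∀ p ∈ Δr, p ∈ pairsOf fs) ∧
      (rel.Nodup → (rel ++ Δr).Nodup) ∧
      (∀ f ∈ fs, pvHead f == fact → [fact, pvSnd f] ∈ rel ++ Δr) := by
  induction fs with
  | nil =>
    intro rel qs kf seen hInv
    exact ⟨[], [], seen, kf, by simp [scanA], by simp [scanB, tailsOf], by simpa using hInv,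
      rfl, by simp, fun h => by simpa using h, by simp⟩
  | cons f fs ih =>
    intro rel qs kf seen hInv
    by_cases h : pvHead f = fact
    · by_cases hmem : [fact, pvSnd f] ∈ rel
      · have hc : (fact, pvSnd f) ∈ seen := by
          have := (hInv fact (pvSnd f)).mpr hmem
          rwa [PySem.Set.contains, List.contains_iff_mem] at this
        obtain ⟨Δr, Δq, seen', kf', e1, e2, hI, hlen, hpr, hnd, hsat⟩ := ih rel qs kf seen hInv
        refine ⟨Δr, Δq, seen', kf', ?_, ?_, hI, hlen, ?_, hnd, ?_⟩
        · simp [scanA, h, hmem, e1]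
        · simp [tailsOf, h, scanB, hc]
          simpa [tailsOf] using e2
        · exact fun p hp => by simp [pairsOf]; exact Or.inr (by simpa [pairsOf] using hpr p hp)
        · intro g hg hfg
          rcases List.mem_cons.mp hg with hg | hg
          · subst hg; exact List.mem_append_left _ hmem
          · exact hsat g hg hfg
      · have hc : (fact, pvSnd f) ∉ seen := by
          intro hx
          exact hmem ((hInv fact (pvSnd f)).mp
            (by rw [PySem.Set.contains, List.contains_iff_mem]; exact hx))
        have hInv' : InvSeen (PySem.Set.add seen (fact, pvSnd f)) (rel ++ [[fact, pvSnd f]]) := by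
          intro a b
          rw [PySem.Set.contains, List.contains_iff_mem, PySem.Set.mem_add]
          constructor
          · rintro (hx | hx)
            · exact List.mem_append_left _ ((hInv a b).mp (by
                rw [PySem.Set.contains, List.contains_iff_mem]; exact hx))
            · rw [Prod.mk.injEq] at hx
              simp [hx.1, hx.2]
          · intro hx
            rcases List.mem_append.mp hx with hx | hx
            · exact Or.inl (by
                have := (hInv a b).mpr hx
                rw [PySem.Set.contains, List.contains_iff_mem] at this; exact this)
            · simp at hx
              exact Or.inr (by rw [Prod.mk.injEq]; exact ⟨hx.1, hx.2⟩)
        obtain ⟨Δr, Δq, seen', kf', e1, e2, hI, hlen, hpr, hnd, hsat⟩ :=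
          ih (rel ++ [[fact, pvSnd f]]) (qs ++ [pvSnd f]) true
            (PySem.Set.add seen (fact, pvSnd f)) hInv'
        refine ⟨[fact, pvSnd f] :: Δr, pvSnd f :: Δq, seen', kf', ?_, ?_, ?_, by simp [hlen],
          ?_, ?_, ?_⟩
        · simpa [scanA, h, hmem, List.append_assoc] using e1
        · rw [show tailsOf (f :: fs) fact = pvSnd f :: tailsOf fs fact by
            simp [tailsOf, h]]
          simpa [scanB, hc, List.append_assoc] using e2
        · simpa [List.append_assoc] using hI
        · intro p hp
          rcases List.mem_cons.mp hp with hp | hp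
          · subst hp; simp [pairsOf, h]
          · simp [pairsOf]
            exact Or.inr (by simpa [pairsOf] using hpr p hp)
        · intro hrel
          have : (rel ++ [[fact, pvSnd f]]).Nodup := by
            simp [List.nodup_append, hrel]
            exact fun a ha he => hmem (he ▸ ha)
          simpa [List.append_assoc] using hnd this
        · intro g hg hfg
          rcases List.mem_cons.mp hg with hg | hg
          · subst hg
            exact List.mem_append_right _ (List.mem_cons_self)
          · simpa [List.append_assoc] using hsat g hg hfg
    · have hb : (pvHead f == fact) = false := by simp [h]
      obtain ⟨Δr, Δq, seen', kf', e1, e2, hI, hlen, hpr, hnd, hsat⟩ := ih rel qs kf seen hInv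
      refine ⟨Δr, Δq, seen', kf', ?_, ?_, hI, hlen, ?_, hnd, ?_⟩
      · simp [scanA, hb, e1]
      · rw [show tailsOf (f :: fs) fact = tailsOf fs fact by simp [tailsOf, hb]]
        exact e2
      · exact fun p hp => by simp [pairsOf]; exact Or.inr (by simpa [pairsOf] using hpr p hp)
      · intro g hg hfg
        rcases List.mem_cons.mp hg with hg | hg
        · subst hg; rw [hfg] at hb; simp at hb
        · exact hsat g hg hfg

-- a Nodup list included in another list is no longer than it (used only to bound fuel)
lemma nodup_subset_length (l m : List (List String)) (h : l.Nodup) (hs : l ⊆ m) :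
    l.length ≤ m.length := by
  calc l.length = l.toFinset.card := (List.toFinset_card_of_nodup h).symm
  _ ≤ m.toFinset.card := Finset.card_le_card (fun x hx => by
      rw [List.mem_toFinset] at *; exact hs hx)
  _ ≤ m.length := m.toFinset_card_le

lemma pass_eq (all : List (List String)) (adj : PySem.Dict String (List String))
    (hadj : ∀ fact, adj.getD fact [] = tailsOf all fact) :
    ∀ (fuel i : Nat) (rel : List (List String)) (qs : List String) (kf : Bool)
      (seen : PySem.Set (String × String)),
      InvSeen seen rel → rel.Nodup → (∀ p ∈ rel, p ∈ pairsOf all) →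
      qs.length + (all.length - rel.length) ≤ i + fuel →
      (∀ j < i, ∀ f ∈ all, pvHead f == qs.getD j "" → [qs.getD j "", pvSnd f] ∈ rel) →
    ∃ rel' qs' kf',
      passA all fuel i (rel, qs, kf) = (rel', qs', kf') ∧
      bfsB adj fuel i (rel, seen, qs) = rel' ∧
      (∀ j < qs'.length, ∀ f ∈ all, pvHead f == qs'.getD j "" → [qs'.getD j "", pvSnd f] ∈ rel') := by
  intro fuel
  induction fuel with
  | zero =>
    intro i rel qs kf seen _ _ _ hfuel hsat
    refine ⟨rel, qs, kf, rfl, rfl, fun j hj => hsat j (by omega)⟩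
  | succ fuel ih =>
    intro i rel qs kf seen hInv hnd hreal hfuel hsat
    by_cases hi : i < qs.length
    · obtain ⟨Δr, Δq, seen', kf1, e1, e2, hI, hlen, hpr, hndp, hsatf⟩ :=
        scan_eq (qs.getD i "") all rel qs kf seen hInv
      have hnd1 : (rel ++ Δr).Nodup := hndp hnd
      have hreal1 : ∀ p ∈ rel ++ Δr, p ∈ pairsOf all := by
        intro p hp
        rcases List.mem_append.mp hp with hp | hp
        · exact hreal p hp
        · exact hpr p hp
      have hbound : (rel ++ Δr).length ≤ all.length := by
        have := nodup_subset_length (rel ++ Δr) (pairsOf all) hnd1 hreal1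
        simpa [pairsOf] using this
      have hfuel1 : (qs ++ Δq).length + (all.length - (rel ++ Δr).length) ≤ (i + 1) + fuel := by
        simp only [List.length_append] at *
        omega
      have hsat1 : ∀ j < i + 1, ∀ f ∈ all,
          pvHead f == (qs ++ Δq).getD j "" → [(qs ++ Δq).getD j "", pvSnd f] ∈ rel ++ Δr := by
        intro j hj
        have hjq : j < qs.length := by omega
        rw [List.getD_append _ _ _ _ hjq]
        rcases Nat.lt_or_ge j i with hji | hji
        · exact fun f hf hm => List.mem_append_left _ (hsat j hji f hf hm)
        · have hj' : j = i := by omega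
          subst hj'
          exact fun f hf hm => hsatf f hf hm
      obtain ⟨rel', qs', kf', E1, E2, SAT⟩ :=
        ih (i + 1) (rel ++ Δr) (qs ++ Δq) kf1 seen' hI hnd1 hreal1 hfuel1 hsat1
      refine ⟨rel', qs', kf', ?_, ?_, SAT⟩
      · rw [passA, if_pos hi, e1, E1]
      · rw [bfsB, if_pos hi, hadj, e2, E2]
    · refine ⟨rel, qs, kf, by rw [passA, if_neg hi], by rw [bfsB, if_neg hi],
        fun j hj => hsat j (by omega)⟩

lemma scan_noop (fact : String) (fs : List (List String)) :
    ∀ (rel : List (List String)) (qs : List String) (kf : Bool),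
    (∀ f ∈ fs, pvHead f == fact → [fact, pvSnd f] ∈ rel) →
    scanA fact fs (rel, qs, kf) = (rel, qs, kf) := by
  induction fs with
  | nil => intro rel qs kf _; simp [scanA]
  | cons f fs ih =>
    intro rel qs kf hsat
    by_cases h : pvHead f = fact
    · have hmem : [fact, pvSnd f] ∈ rel := hsat f (by simp) (by simp [h])
      simp only [scanA, h, BEq.rfl, if_true, hmem]
      exact ih rel qs kf (fun g hg => hsat g (by simp [hg]))
    · have hb : (pvHead f == fact) = false := by simp [h]
      simp only [scanA, hb, Bool.false_eq_true, if_false]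
      exact ih rel qs kf (fun g hg => hsat g (by simp [hg]))

lemma pass_noop (all : List (List String)) :
    ∀ (fuel i : Nat) (rel : List (List String)) (qs : List String),
    (∀ j < qs.length, ∀ f ∈ all, pvHead f == qs.getD j "" → [qs.getD j "", pvSnd f] ∈ rel) →
    passA all fuel i (rel, qs, false) = (rel, qs, false) := by
  intro fuel
  induction fuel with
  | zero => intro i rel qs _; simp [passA]
  | succ fuel ih =>
    intro i rel qs hsat
    by_cases hi : i < qs.length
    · rw [passA, if_pos hi, scan_noop _ _ _ _ _ (hsat i hi)]
      exact ih (i + 1) rel qs hsat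
    · rw [passA, if_neg hi]

-- ===== VERDICT (by name: the statement is the Claim_ definition above) =====
theorem find_related_facts_spec : Claim_equal_find_related_facts := by
  intro s a _ _
  show find_related_facts s a = find_related_facts_alt s a
  have hadj : ∀ fact, (buildAdj a PySem.Dict.empty).getD fact [] = tailsOf a fact := by
    intro fact
    rw [buildAdj_getD]
    simp [PySem.Dict.getD_empty]
  have hInv0 : InvSeen PySem.Set.empty [] := by
    intro x y
    simp [PySem.Set.contains, PySem.Set.empty]
  obtain ⟨rel', qs', kf', E1, E2, SAT⟩ :=
    pass_eq a (buildAdj a PySem.Dict.empty) hadj (s.length + a.length + 1) 0 [] s false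
      PySem.Set.empty hInv0 (by simp) (by simp) (by omega) (by omega)
  have hAlt : find_related_facts_alt s a = rel' := E2
  rw [hAlt]
  show loopA a (a.length + 1) [] s = rel'
  rw [loopA, E1]
  cases kf' with
  | false => rfl
  | true =>
    simp only [if_true]
    cases a with
    | nil => rfl
    | cons f fs =>
      show loopA (f :: fs) ((f :: fs).length - 1 + 1) rel' qs' = rel'
      rw [loopA, pass_noop _ _ _ _ _ SAT]
      rfl
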